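-- pv_equiv track=rewrite | github.com/zjunet/TrimDG | utils/utils.py | time_proximity_removal
-- ===== SOURCE A (Python) =====
-- def time_proximity_removal(edges, tau):
--     """
--     时间邻近去重
--     :param edges: 边列表，每个元素为 (节点1, 节点2, 时间戳)
--     :param tau: 时间窗口阈值
--     :return: 去重后的边列表
--     """
--     edges.sort(key=lambda x: (x[0], x[1], x[2]))
--     result = []
--     prev_edge = None
--     for edge in edges:
--         if prev_edge is None or edge[0] != prev_edge[0] or edge[1] != prev_edge[1] or edge[2] - prev_edge[2] > tau:
--             result.append(edge)
--             prev_edge = edge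
--     return result
-- ===== SOURCE B (Python) =====
-- def time_proximity_removal(edges, tau):
--     # Bucket-by-node-pair: handle each distinct (u, v) pair independently,
--     # sorting only its timestamps; no global sort of the edge list.
--     # (Unlike A, this does not sort `edges` in place; return value only.)
--     pairs = sorted(set((u, v) for (u, v, _) in edges))
--     result = []
--     for (u, v) in pairs:
--         last = None
--         for t in sorted(t for (a, b, t) in edges if (a, b) == (u, v)):
--             if last is None or t - last > tau:
--                 result.append((u, v, t))
--                 last = t
--     return result
-- ===== Notes on version B (the rewrite author's own statement) =====
-- stated objective: alternative
-- what changed: B replaces A's global lexicographic sort followed by one linear scan with a per-node-pair bucket algorithm: it collects the distinct (node1,node2) pairs with a set, and for each pair filters out and sorts only that pair's timestamps and dedups them independently; B does not sort the input list in place (return value only).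
import Mathlib
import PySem

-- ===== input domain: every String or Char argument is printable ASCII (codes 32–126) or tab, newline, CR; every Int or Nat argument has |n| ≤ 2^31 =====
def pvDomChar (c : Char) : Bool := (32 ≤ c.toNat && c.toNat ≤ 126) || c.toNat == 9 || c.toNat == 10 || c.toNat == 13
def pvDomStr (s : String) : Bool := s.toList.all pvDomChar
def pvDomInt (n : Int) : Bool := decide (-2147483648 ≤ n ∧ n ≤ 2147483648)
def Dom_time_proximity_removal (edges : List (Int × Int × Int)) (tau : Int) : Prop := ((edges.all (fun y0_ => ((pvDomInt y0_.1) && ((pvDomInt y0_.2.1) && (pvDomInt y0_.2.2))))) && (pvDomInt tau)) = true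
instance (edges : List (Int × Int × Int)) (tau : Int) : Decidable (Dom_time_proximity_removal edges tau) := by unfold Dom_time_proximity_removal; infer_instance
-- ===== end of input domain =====

-- B buckets the edges by distinct (node1,node2) pair (a set of pairs, then a
-- per-pair filter-and-sort of timestamps) instead of A's global sort plus one
-- linear scan; A sorts `edges` in place in Python while B leaves it unchanged —
-- the equivalence proved here is about the return value only.

-- ===== PORT A =====
-- Python's key lambda x: (x[0], x[1], x[2]) compares tuples lexicographically;
-- ported exactly via the lexicographic product order (toLex).
def tprSort (edges : List (Int × Int × Int)) : List (Int × Int × Int) :=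
  PySem.List.sorted edges (fun x => toLex (x.1, toLex (x.2.1, x.2.2))) false

def tprGoA (tau : Int) : List (Int × Int × Int) → Option (Int × Int × Int) → List (Int × Int × Int)
  | [], _ => []
  | e :: rest, none => e :: tprGoA tau rest (some e)
  | e :: rest, some p =>
    if e.1 ≠ p.1 ∨ e.2.1 ≠ p.2.1 ∨ e.2.2 - p.2.2 > tau then
      e :: tprGoA tau rest (some e)
    else
      tprGoA tau rest (some p)

def time_proximity_removal (edges : List (Int × Int × Int)) (tau : Int) : List (Int × Int × Int) :=
  tprGoA tau (tprSort edges) none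

-- ===== PORT B =====
-- pairs = sorted(set((u, v) for (u, v, _) in edges)); Python sorts pairs lexicographically
def tprKeys (edges : List (Int × Int × Int)) : List (Int × Int) :=
  PySem.List.sorted (PySem.Set.ofList (edges.map (fun e => (e.1, e.2.1)))) (fun k => toLex k) false

-- sorted(t for (a, b, t) in edges if (a, b) == (u, v))
def tprTimes (edges : List (Int × Int × Int)) (k : Int × Int) : List Int :=
  PySem.List.sorted ((edges.filter (fun e => (e.1, e.2.1) == k)).map (fun e => e.2.2)) (fun t => t) false

-- the inner 'for t in …' loop with its Optional `last`
def tprKeep (tau u v : Int) : List Int → Option Int → List (Int × Int × Int)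
  | [], _ => []
  | t :: ts, none => (u, v, t) :: tprKeep tau u v ts (some t)
  | t :: ts, some l =>
    if t - l > tau then (u, v, t) :: tprKeep tau u v ts (some t)
    else tprKeep tau u v ts (some l)

def time_proximity_removal_alt (edges : List (Int × Int × Int)) (tau : Int) : List (Int × Int × Int) :=
  (tprKeys edges).foldl (fun acc k => acc ++ tprKeep tau k.1 k.2 (tprTimes edges k) none) []

-- ===== PRECONDITION & SPEC =====
def Spec_time_proximity_removal (edges : List (Int × Int × Int)) (tau : Int) (out : List (Int × Int × Int)) : Prop := out = time_proximity_removal_alt edges tau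
instance (edges : List (Int × Int × Int)) (tau : Int) (out : List (Int × Int × Int)) : Decidable (Spec_time_proximity_removal edges tau out) := by unfold Spec_time_proximity_removal; infer_instance

-- ===== CLAIM (what is proved, stated in full; the proofs are below) =====
def Claim_equal_time_proximity_removal : Prop := ∀ (edges : List (Int × Int × Int)) (tau : Int), Dom_time_proximity_removal edges tau → Spec_time_proximity_removal edges tau (time_proximity_removal edges tau)

-- ===== LEMMAS AND PROOFS =====

-- proof-only abbreviations: A's full sort key and the (node1,node2) key
def tprKey3 (e : Int × Int × Int) : Lex (Int × Lex (Int × Int)) := toLex (e.1, toLex (e.2.1, e.2.2))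
def tprKeyP (e : Int × Int × Int) : Int × Int := (e.1, e.2.1)
-- one (u,v) block of B's output order: that pair's sorted timestamps re-tupled
def tprBlock (edges : List (Int × Int × Int)) (k : Int × Int) : List (Int × Int × Int) :=
  (tprTimes edges k).map (fun t => (k.1, k.2, t))

lemma tprKey3_injective : Function.Injective tprKey3 := by
  intro a b h
  simp only [tprKey3, toLex_inj, Prod.mk.injEq] at h
  obtain ⟨h1, h2, h3⟩ := h
  exact Prod.ext h1 (Prod.ext h2 h3)

lemma tprKeys_nodup (edges : List (Int × Int × Int)) : (tprKeys edges).Nodup :=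
  ((PySem.List.sorted_perm _ _ _).symm).nodup (PySem.Set.nodup_ofList _)

-- A's scan with a previous edge whose pair occurs nowhere in the list behaves
-- like a fresh scan
lemma tprGoA_fresh (tau : Int) (R : List (Int × Int × Int)) (p : Int × Int × Int)
    (h : ∀ e ∈ R, tprKeyP e ≠ tprKeyP p) :
    tprGoA tau R (some p) = tprGoA tau R none := by
  cases R with
  | nil => rfl
  | cons e R' =>
    have hne : tprKeyP e ≠ tprKeyP p := h e (by simp)
    have hcond : e.1 ≠ p.1 ∨ e.2.1 ≠ p.2.1 ∨ e.2.2 - p.2.2 > tau := by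
      by_cases h1 : e.1 = p.1
      · by_cases h2 : e.2.1 = p.2.1
        · exact absurd (by simp [tprKeyP, h1, h2]) hne
        · exact Or.inr (Or.inl h2)
      · exact Or.inl h1
    simp [tprGoA, hcond]

-- A's scan over one (u,v) block followed by foreign edges
lemma tprGoA_block (tau u v : Int) : ∀ (ts : List Int) (R : List (Int × Int × Int)) (last : Int),
    (∀ e ∈ R, tprKeyP e ≠ (u, v)) →
    tprGoA tau (ts.map (fun t => (u, v, t)) ++ R) (some (u, v, last)) =
      tprKeep tau u v ts (some last) ++ tprGoA tau R none := by
  intro ts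
  induction ts with
  | nil =>
    intro R last hR
    simpa [tprKeep] using tprGoA_fresh tau R (u, v, last) (by simpa [tprKeyP] using hR)
  | cons t ts' ih =>
    intro R last hR
    by_cases hg : t - last > tau
    · simp [tprGoA, tprKeep, hg, ih R t hR]
    · simp [tprGoA, tprKeep, hg, ih R last hR]

lemma tprKeyP_mem_flatMap (ks : List (Int × Int)) (g : (Int × Int) → List Int)
    (e : Int × Int × Int)
    (he : e ∈ ks.flatMap (fun k => (g k).map (fun t => (k.1, k.2, t)))) :
    tprKeyP e ∈ ks := by
  rcases List.mem_flatMap.mp he with ⟨k, hk, hm⟩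
  rcases List.mem_map.mp hm with ⟨t, _, rfl⟩
  simpa [tprKeyP] using hk

-- A's scan over a concatenation of blocks with pairwise-distinct pairs is the
-- concatenation of the per-block dedups
lemma tprGoA_flatMap (tau : Int) : ∀ (ks : List (Int × Int)), ks.Nodup →
    ∀ (g : (Int × Int) → List Int),
    tprGoA tau (ks.flatMap (fun k => (g k).map (fun t => (k.1, k.2, t)))) none =
      ks.flatMap (fun k => tprKeep tau k.1 k.2 (g k) none) := by
  intro ks
  induction ks with
  | nil => intro _ g; rfl
  | cons k ks' ih =>
    intro hnd g
    have hnd' : ks'.Nodup := (List.nodup_cons.mp hnd).2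
    have hknot : k ∉ ks' := (List.nodup_cons.mp hnd).1
    have hR : ∀ e ∈ ks'.flatMap (fun k => (g k).map (fun t => (k.1, k.2, t))), tprKeyP e ≠ (k.1, k.2) := by
      intro e he heq
      have := tprKeyP_mem_flatMap ks' g e he
      rw [heq] at this
      exact hknot (by simpa using this)
    cases hts : g k with
    | nil => simpa [hts, tprKeep] using ih hnd' g
    | cons t ts' =>
      simp only [List.flatMap_cons, hts, List.map_cons, List.cons_append, tprGoA, tprKeep]
      rw [tprGoA_block tau k.1 k.2 ts' _ t hR, ih hnd' g]

-- flatMap respects per-element permutation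
lemma tprPerm_flatMap_congr {α β : Type} (ks : List α) (f g : α → List β)
    (h : ∀ k ∈ ks, (f k).Perm (g k)) : (ks.flatMap f).Perm (ks.flatMap g) := by
  induction ks with
  | nil => simp
  | cons k ks' ih =>
    simp only [List.flatMap_cons]
    exact (h k (by simp)).append (ih (fun k' hk' => h k' (by simp [hk'])))

-- a list is the concatenation of its pair-filters over any nodup pair list
-- covering all its pairs
lemma tprFilter_perm : ∀ (ks : List (Int × Int)), ks.Nodup →
    ∀ (l : List (Int × Int × Int)), (∀ e ∈ l, tprKeyP e ∈ ks) →
    l.Perm (ks.flatMap (fun k => l.filter (fun e => tprKeyP e == k))) := by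
  intro ks
  induction ks with
  | nil =>
    intro _ l hcov
    have hl : l = [] := by
      cases l with
      | nil => rfl
      | cons e t => cases hcov e (by simp)
    simp [hl]
  | cons k ks' ih =>
    intro hnd l hcov
    have hnd' : ks'.Nodup := (List.nodup_cons.mp hnd).2
    have hknot : k ∉ ks' := (List.nodup_cons.mp hnd).1
    have hsplit := List.filter_append_perm (fun e => tprKeyP e == k) l
    have hcov' : ∀ e ∈ l.filter (fun e => !(tprKeyP e == k)), tprKeyP e ∈ ks' := by
      intro e he
      have hm := List.mem_filter.mp he
      have hne : tprKeyP e ≠ k := by simpa using hm.2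
      have := hcov e hm.1
      simp only [List.mem_cons] at this
      rcases this with h | h
      · exact absurd h hne
      · exact h
    have hih := ih hnd' (l.filter (fun e => !(tprKeyP e == k))) hcov'
    have hcongr : ∀ k' ∈ ks',
        ((l.filter (fun e => !(tprKeyP e == k))).filter (fun e => tprKeyP e == k')).Perm
          (l.filter (fun e => tprKeyP e == k')) := by
      intro k' hk'
      have heq : (l.filter (fun e => !(tprKeyP e == k))).filter (fun e => tprKeyP e == k') =
          l.filter (fun e => tprKeyP e == k') := by
        rw [List.filter_filter]
        refine List.filter_congr ?_
        intro e _
        by_cases h : tprKeyP e = k'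
        · have hkk : ¬k' = k := fun hh => hknot (hh ▸ hk')
          simp [h, hkk]
        · simp [h]
      rw [heq]
    have hrest := hih.trans (tprPerm_flatMap_congr ks' _ _ hcongr)
    refine hsplit.symm.trans ?_
    simp only [List.flatMap_cons]
    exact List.Perm.append_left _ hrest

-- one block is a permutation of the corresponding pair-filter of the edges
lemma tprBlock_perm (edges : List (Int × Int × Int)) (k : Int × Int) :
    (tprBlock edges k).Perm (edges.filter (fun e => tprKeyP e == k)) := by
  have hfun : (fun e : Int × Int × Int => ((e.1, e.2.1) == k)) = (fun e => tprKeyP e == k) := rfl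
  have hp : (tprTimes edges k).Perm ((edges.filter (fun e => tprKeyP e == k)).map (fun e => e.2.2)) := by
    simpa [tprTimes, hfun] using
      PySem.List.sorted_perm ((edges.filter (fun e => tprKeyP e == k)).map (fun e => e.2.2)) (fun t => t) false
  have hmap := hp.map (fun t => (k.1, k.2, t))
  refine hmap.trans ?_
  rw [List.map_map]
  have : ∀ e ∈ edges.filter (fun e => tprKeyP e == k),
      ((fun t => (k.1, k.2, t)) ∘ (fun e : Int × Int × Int => e.2.2)) e = id e := by
    intro e he
    have hk : tprKeyP e = k := by simpa using (List.mem_filter.mp he).2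
    obtain ⟨a, b, c⟩ := e
    obtain ⟨k1, k2⟩ := k
    simp only [tprKeyP, Prod.mk.injEq] at hk
    simp [Function.comp, hk.1, hk.2]
  rw [List.map_congr_left this, List.map_id]

-- B's output order is a permutation of the input edges
lemma tprC_perm (edges : List (Int × Int × Int)) :
    edges.Perm ((tprKeys edges).flatMap (tprBlock edges)) := by
  have hcov : ∀ e ∈ edges, tprKeyP e ∈ tprKeys edges := by
    intro e he
    refine (PySem.List.mem_sorted _ _ _ _).mpr ?_
    exact (PySem.Set.mem_ofList _ _).mpr (List.mem_map.mpr ⟨e, he, rfl⟩)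
  refine (tprFilter_perm (tprKeys edges) (tprKeys_nodup edges) edges hcov).trans ?_
  exact tprPerm_flatMap_congr _ _ _ (fun k hk => (tprBlock_perm edges k).symm)

-- the distinct pairs are strictly increasing in the pair order
lemma tprKeys_pairwise_lt (edges : List (Int × Int × Int)) :
    (tprKeys edges).Pairwise (fun a b => toLex a < toLex b) := by
  have hle : (tprKeys edges).Pairwise (fun a b => toLex a ≤ toLex b) :=
    PySem.List.sorted_pairwise _ _
  have hne : (tprKeys edges).Pairwise (fun a b => a ≠ b) := tprKeys_nodup edges
  exact (hle.and hne).imp (fun h => lt_of_le_of_ne h.1 (fun hh => h.2 (toLex_inj.mp hh)))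

lemma tprKey3_le_of_keyP_lt (x y : Int × Int × Int)
    (h : toLex (tprKeyP x) < toLex (tprKeyP y)) : tprKey3 x ≤ tprKey3 y := by
  rw [Prod.Lex.toLex_lt_toLex] at h
  simp only [tprKeyP] at h
  rw [tprKey3, tprKey3, Prod.Lex.toLex_le_toLex]
  rcases h with h | ⟨h1, h2⟩
  · exact Or.inl h
  · exact Or.inr ⟨h1, Prod.Lex.toLex_le_toLex.mpr (Or.inl h2)⟩

-- B's output order is sorted by A's full sort key
lemma tprC_pairwise (edges : List (Int × Int × Int)) :
    ((tprKeys edges).flatMap (tprBlock edges)).Pairwise (fun a b => tprKey3 a ≤ tprKey3 b) := by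
  have hmain : ∀ (ks : List (Int × Int)), ks.Pairwise (fun a b => toLex a < toLex b) →
      (ks.flatMap (tprBlock edges)).Pairwise (fun a b => tprKey3 a ≤ tprKey3 b) := by
    intro ks
    induction ks with
    | nil => intro _; simp
    | cons k ks' ih =>
      intro hks
      obtain ⟨hhead, htail⟩ := List.pairwise_cons.mp hks
      simp only [List.flatMap_cons]
      rw [List.pairwise_append]
      refine ⟨?_, ih htail, ?_⟩
      · -- within one block: timestamps are sorted and the pair is constant
        have ht : (tprTimes edges k).Pairwise (fun a b => a ≤ b) :=
          PySem.List.sorted_pairwise _ _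
        refine List.Pairwise.map _ ?_ ht
        intro a b hab
        rw [tprKey3, tprKey3, Prod.Lex.toLex_le_toLex]
        exact Or.inr ⟨rfl, Prod.Lex.toLex_le_toLex.mpr (Or.inr ⟨rfl, hab⟩)⟩
      · -- across blocks: the pairs strictly increase
        intro x hx y hy
        rcases List.mem_map.mp hx with ⟨t, _, rfl⟩
        have hky : tprKeyP y ∈ ks' := tprKeyP_mem_flatMap ks' (tprTimes edges) y hy
        have hlt : toLex k < toLex (tprKeyP y) := hhead _ hky
        have hkx : tprKeyP (k.1, k.2, t) = k := by simp [tprKeyP]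
        exact tprKey3_le_of_keyP_lt _ _ (by rw [hkx]; exact hlt)
  exact hmain _ (tprKeys_pairwise_lt edges)

-- A's sorted edge list IS B's output order: same multiset, both sorted by the
-- injective full key
lemma tprSort_eq (edges : List (Int × Int × Int)) :
    tprSort edges = (tprKeys edges).flatMap (tprBlock edges) := by
  refine PySem.List.eq_of_perm_of_pairwise_le_of_injective tprKey3 tprKey3_injective
    ((PySem.List.sorted_perm _ _ _).trans (tprC_perm edges)) ?_ (tprC_pairwise edges)
  exact PySem.List.sorted_pairwise edges (fun x => toLex (x.1, toLex (x.2.1, x.2.2)))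

-- ===== VERDICT (by name: the statement is the Claim_ definition above) =====
theorem time_proximity_removal_spec : Claim_equal_time_proximity_removal := by
  intro edges tau _
  unfold Spec_time_proximity_removal time_proximity_removal time_proximity_removal_alt
  rw [tprSort_eq, PySem.List.foldl_append_eq_flatMap]
  simp only [List.nil_append]
  exact tprGoA_flatMap tau (tprKeys edges) (tprKeys_nodup edges) (tprTimes edges)
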